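-- pv_equiv track=rewrite | github.com/mbrosenuw/dmsklone | Code/Hamiltonians/ham.py | getfullblocks
-- ===== SOURCE A (Python) =====
-- def getfullblocks(basis):
--     blocks = {}
--     for idx, (m, l, gamma1, p, j, gamma2, gamma0) in enumerate(basis):
--         if (l, j, gamma0) not in blocks:
--             blocks[(l, j, gamma0)] = {"start": idx, "end": idx, "count": 1}
--         else:
--             blocks[(l, j, gamma0)]["end"] = idx
--             blocks[(l, j, gamma0)]["count"] += 1
--     return blocks
-- ===== SOURCE B (Python) =====
-- def getfullblocks(basis):
--     groups = {}
--     for idx, (m, l, gamma1, p, j, gamma2, gamma0) in enumerate(basis):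
--         groups.setdefault((l, j, gamma0), []).append(idx)
--     return {k: {"start": v[0], "end": v[-1], "count": len(v)}
--             for k, v in groups.items()}
-- ===== Notes on version B (the rewrite author's own statement) =====
-- stated objective: alternative
-- what changed: B collects all indices per (l,j,gamma0) key into lists in one pass, then summarizes each list to start/end/count in a second pass, replacing A's per-element presence-check-and-update of the summary record.
import Mathlib
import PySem

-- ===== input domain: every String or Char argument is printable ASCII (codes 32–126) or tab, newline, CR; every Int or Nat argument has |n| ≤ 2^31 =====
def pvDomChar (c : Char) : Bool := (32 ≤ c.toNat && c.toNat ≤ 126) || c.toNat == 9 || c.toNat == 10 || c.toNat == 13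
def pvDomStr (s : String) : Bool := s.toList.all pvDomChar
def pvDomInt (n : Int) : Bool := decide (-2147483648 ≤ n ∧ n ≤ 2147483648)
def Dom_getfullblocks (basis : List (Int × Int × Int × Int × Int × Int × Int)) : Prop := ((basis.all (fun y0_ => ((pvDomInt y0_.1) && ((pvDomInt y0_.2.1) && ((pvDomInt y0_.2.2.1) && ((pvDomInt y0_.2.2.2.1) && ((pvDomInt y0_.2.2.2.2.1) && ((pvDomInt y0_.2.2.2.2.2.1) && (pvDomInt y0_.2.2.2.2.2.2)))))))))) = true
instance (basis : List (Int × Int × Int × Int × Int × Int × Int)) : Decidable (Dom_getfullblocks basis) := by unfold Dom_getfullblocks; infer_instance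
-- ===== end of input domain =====

-- B groups all indices per (l, j, gamma0) key in one pass and summarizes each index list to
-- start/end/count in a second pass, instead of A's per-element presence-check-and-update of the
-- summary record; same cost, different decomposition.

-- the Python tuple unpacking '(m, l, gamma1, p, j, gamma2, gamma0)' restricted to the key (l, j, gamma0)
def pvKey (t : Int × Int × Int × Int × Int × Int × Int) : Int × Int × Int :=
  (t.2.1, t.2.2.2.2.1, t.2.2.2.2.2.2)

-- ===== PORT A =====
def getfullblocks (basis : List (Int × Int × Int × Int × Int × Int × Int)) : List (Int × Int × Int × List (String × Int)) :=
  ((PySem.List.enumerate basis).foldl (fun blocks p =>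
      if blocks.contains (pvKey p.2) = false then
        blocks.insert (pvKey p.2) (PySem.Dict.ofList [("start", p.1), ("end", p.1), ("count", 1)])
      else
        blocks.modify (pvKey p.2) PySem.Dict.empty
          (fun inner => (inner.insert "end" p.1).modify "count" 0 (· + 1)))
    (PySem.Dict.empty : PySem.Dict (Int × Int × Int) (PySem.Dict String Int))).items.map
    (fun q => (q.1.1, q.1.2.1, q.1.2.2, q.2.items))

-- ===== PORT B =====
def getfullblocks_alt (basis : List (Int × Int × Int × Int × Int × Int × Int)) : List (Int × Int × Int × List (String × Int)) :=
  ((PySem.List.enumerate basis).foldl (fun g p => g.modify (pvKey p.2) [] (· ++ [p.1]))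
    (PySem.Dict.empty : PySem.Dict (Int × Int × Int) (List Int))).items.map
    (fun q => (q.1.1, q.1.2.1, q.1.2.2,
      [("start", PySem.List.pyGetD q.2 0 0), ("end", PySem.List.pyGetD q.2 (-1) 0),
       ("count", (q.2.length : Int))]))

-- ===== PRECONDITION & SPEC =====
def Spec_getfullblocks (basis : List (Int × Int × Int × Int × Int × Int × Int)) (out : List (Int × Int × Int × List (String × Int))) : Prop := out = getfullblocks_alt basis
instance (basis : List (Int × Int × Int × Int × Int × Int × Int)) (out : List (Int × Int × Int × List (String × Int))) : Decidable (Spec_getfullblocks basis out) := by unfold Spec_getfullblocks; infer_instance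

-- ===== CLAIM (what is proved, stated in full; the proofs are below) =====
def Claim_equal_getfullblocks : Prop := ∀ (basis : List (Int × Int × Int × Int × Int × Int × Int)), Dom_getfullblocks basis → Spec_getfullblocks basis (getfullblocks basis)

-- ===== LEMMAS AND PROOFS =====

-- the summary dict A maintains for a key whose index list (in B) is i0 :: rest
def pvInner (i0 : Int) (rest : List Int) : PySem.Dict String Int :=
  PySem.Dict.mk [("start", i0), ("end", rest.getLastD i0), ("count", ((rest.length : Int) + 1))]

-- invariant relating A's dict of summary records to B's dict of index lists
def pvInv (dA : PySem.Dict (Int × Int × Int) (PySem.Dict String Int))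
    (dB : PySem.Dict (Int × Int × Int) (List Int)) : Prop :=
  dA.keys = dB.keys ∧ dB.keys.Nodup ∧
  ∀ k : Int × Int × Int,
    (dB.getD k [] = [] → dA.contains k = false) ∧
    (∀ i0 rest, dB.getD k [] = i0 :: rest →
      dA.contains k = true ∧ dA.getD k PySem.Dict.empty = pvInner i0 rest)

theorem pvInnerStep (s e c i : Int) :
    ((PySem.Dict.mk [("start", s), ("end", e), ("count", c)]).insert "end" i).modify "count" 0 (· + 1)
    = PySem.Dict.mk [("start", s), ("end", i), ("count", c + 1)] := rfl

theorem pvOfList3 (a b c : Int) :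
    PySem.Dict.ofList [("start", a), ("end", b), ("count", c)]
    = PySem.Dict.mk [("start", a), ("end", b), ("count", c)] := rfl

theorem pvLastShift (t : List Int) (a i0 : Int) : (a :: t).getLast?.getD i0 = t.getLast?.getD a := by
  cases t with
  | nil => rfl
  | cons b u =>
      rw [List.getLast?_cons_cons]
      obtain ⟨x, hx⟩ := Option.isSome_iff_exists.mp (by simp : (b :: u).getLast?.isSome)
      simp [hx]

theorem pvGetLast : ∀ (rest : List Int) (i0 : Int), (i0 :: rest)[rest.length] = rest.getLastD i0
  | [], _ => rfl
  | a :: t, i0 => by simpa [pvLastShift] using pvGetLast t a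

theorem pvGetNeg (rest : List Int) (i0 : Int) :
    PySem.List.pyGetD (i0 :: rest) (-1) 0 = rest.getLastD i0 := by
  simp [PySem.List.pyGetD, PySem.List.pyGet?, PySem.List.pyIdx?, pvGetLast]

theorem pvStep (dA : PySem.Dict (Int × Int × Int) (PySem.Dict String Int))
    (dB : PySem.Dict (Int × Int × Int) (List Int))
    (p : Int × (Int × Int × Int × Int × Int × Int × Int)) (h : pvInv dA dB) :
    pvInv
      (if dA.contains (pvKey p.2) = false then
        dA.insert (pvKey p.2) (PySem.Dict.ofList [("start", p.1), ("end", p.1), ("count", 1)])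
      else
        dA.modify (pvKey p.2) PySem.Dict.empty
          (fun inner => (inner.insert "end" p.1).modify "count" 0 (· + 1)))
      (dB.modify (pvKey p.2) [] (· ++ [p.1])) := by
  obtain ⟨hk, hnd, hv⟩ := h
  set k0 := pvKey p.2 with hk0
  have hndA : dA.keys.Nodup := hk ▸ hnd
  have hcc : dA.contains k0 = dB.contains k0 := by
    rw [PySem.Dict.contains_eq_decide_mem_keys, PySem.Dict.contains_eq_decide_mem_keys, hk]
  by_cases hc : dA.contains k0 = false
  · -- key is new on both sides
    have hcB : dB.contains k0 = false := hcc ▸ hc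
    have hBnil : dB.getD k0 [] = [] := PySem.Dict.getD_of_not_contains dB _ hcB
    have hkmem : k0 ∉ dB.keys := by
      have := PySem.Dict.contains_eq_decide_mem_keys dB k0
      rw [hcB] at this; simpa using this.symm
    rw [if_pos hc]
    refine ⟨?_, ?_, ?_⟩
    · rw [PySem.Dict.keys_insert_of_not_contains dA _ hc,
        PySem.Dict.keys_modify, PySem.Dict.keys_insert_of_not_contains dB _ hcB, hk]
    · rw [PySem.Dict.keys_modify, PySem.Dict.keys_insert_of_not_contains dB _ hcB]
      simp [List.nodup_append, hnd]
      intro a b c hm he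
      exact hkmem (he ▸ hm)
    · intro k
      by_cases hkk : k = k0
      · constructor
        · intro hcontra
          rw [PySem.Dict.getD_modify, if_pos hkk, hBnil] at hcontra
          simp at hcontra
        · intro i0 rest hrest
          rw [PySem.Dict.getD_modify, if_pos hkk, hBnil] at hrest
          simp only [List.nil_append, List.cons.injEq] at hrest
          obtain ⟨h1, h2⟩ := hrest
          constructor
          · rw [PySem.Dict.contains_insert]; simp [hkk]
          · rw [PySem.Dict.getD_insert, if_pos hkk, pvOfList3, ← h1, ← h2]
            simp [pvInner]
      · have hB' : (dB.modify k0 [] (· ++ [p.1])).getD k [] = dB.getD k [] := by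
          rw [PySem.Dict.getD_modify, if_neg hkk]
        have hA'c : (dA.insert k0 (PySem.Dict.ofList [("start", p.1), ("end", p.1), ("count", 1)])).contains k = dA.contains k := by
          rw [PySem.Dict.contains_insert]; simp [hkk]
        have hA'g : (dA.insert k0 (PySem.Dict.ofList [("start", p.1), ("end", p.1), ("count", 1)])).getD k PySem.Dict.empty = dA.getD k PySem.Dict.empty := by
          rw [PySem.Dict.getD_insert, if_neg hkk]
        rw [hB', hA'c, hA'g]
        exact hv k
  · -- key already present on both sides
    have hcT : dA.contains k0 = true := by revert hc; cases dA.contains k0 <;> simp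
    have hcB : dB.contains k0 = true := hcc ▸ hcT
    rw [if_neg hc]
    refine ⟨?_, ?_, ?_⟩
    · rw [PySem.Dict.keys_modify, PySem.Dict.keys_modify,
        PySem.Dict.keys_insert_of_contains, PySem.Dict.keys_insert_of_contains, hk]
      · exact hcB
      · exact hcT
    · rw [PySem.Dict.keys_modify, PySem.Dict.keys_insert_of_contains dB _ hcB]
      exact hnd
    · intro k
      by_cases hkk : k = k0
      · rw [hkk]
        cases hB : dB.getD k0 [] with
        | nil => exact absurd ((hv k0).1 hB) (by rw [hcT]; simp)
        | cons i0 rest =>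
          obtain ⟨_, hA⟩ := (hv k0).2 i0 rest hB
          constructor
          · intro hcontra
            rw [PySem.Dict.getD_modify, if_pos rfl, hB] at hcontra
            simp at hcontra
          · intro j0 js hrest
            rw [PySem.Dict.getD_modify, if_pos rfl, hB] at hrest
            simp only [List.cons_append, List.cons.injEq] at hrest
            obtain ⟨h1, h2⟩ := hrest
            constructor
            · rw [PySem.Dict.contains_modify]; simp
            · rw [PySem.Dict.getD_modify, if_pos rfl, hA, pvInner, pvInnerStep]
              subst h1; rw [← h2]
              simp only [pvInner, PySem.Dict.mk.injEq, List.cons.injEq, Prod.mk.injEq,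
                List.getLastD_concat, true_and, and_true]
              first
                | (refine ⟨trivial, ?_⟩
                   simp only [List.length_append, List.length_cons, List.length_nil,
                     Nat.cast_add, Nat.cast_one, Nat.cast_zero]
                   ring)
                | (simp only [List.length_append, List.length_cons, List.length_nil,
                     Nat.cast_add, Nat.cast_one, Nat.cast_zero]
                   ring)
      · have hB' : (dB.modify k0 [] (· ++ [p.1])).getD k [] = dB.getD k [] := by
          rw [PySem.Dict.getD_modify, if_neg hkk]
        have hA'c : (dA.modify k0 PySem.Dict.empty (fun inner => (inner.insert "end" p.1).modify "count" 0 (· + 1))).contains k = dA.contains k := by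
          rw [PySem.Dict.contains_modify]; simp [hkk]
        have hA'g : (dA.modify k0 PySem.Dict.empty (fun inner => (inner.insert "end" p.1).modify "count" 0 (· + 1))).getD k PySem.Dict.empty = dA.getD k PySem.Dict.empty := by
          rw [PySem.Dict.getD_modify, if_neg hkk]
        rw [hB', hA'c, hA'g]
        exact hv k

theorem pvFold : ∀ (ps : List (Int × (Int × Int × Int × Int × Int × Int × Int)))
    (dA : PySem.Dict (Int × Int × Int) (PySem.Dict String Int))
    (dB : PySem.Dict (Int × Int × Int) (List Int)), pvInv dA dB →
    pvInv
      (ps.foldl (fun blocks p =>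
        if blocks.contains (pvKey p.2) = false then
          blocks.insert (pvKey p.2) (PySem.Dict.ofList [("start", p.1), ("end", p.1), ("count", 1)])
        else
          blocks.modify (pvKey p.2) PySem.Dict.empty
            (fun inner => (inner.insert "end" p.1).modify "count" 0 (· + 1))) dA)
      (ps.foldl (fun g p => g.modify (pvKey p.2) [] (· ++ [p.1])) dB)
  | [], _, _, h => h
  | p :: ps, dA, dB, h => pvFold ps _ _ (pvStep dA dB p h)

theorem pvItems (dA : PySem.Dict (Int × Int × Int) (PySem.Dict String Int))
    (dB : PySem.Dict (Int × Int × Int) (List Int)) (h : pvInv dA dB) :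
    dA.items.map (fun q => (q.1.1, q.1.2.1, q.1.2.2, q.2.items))
    = dB.items.map (fun q => (q.1.1, q.1.2.1, q.1.2.2,
        [("start", PySem.List.pyGetD q.2 0 0), ("end", PySem.List.pyGetD q.2 (-1) 0),
         ("count", (q.2.length : Int))])) := by
  obtain ⟨hk, hnd, hv⟩ := h
  have hndA : dA.keys.Nodup := hk ▸ hnd
  rw [PySem.Dict.items_eq_map_keys dA hndA PySem.Dict.empty,
    PySem.Dict.items_eq_map_keys dB hnd [], hk, List.map_map, List.map_map]
  apply List.map_congr_left
  intro k hkmem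
  have hc : dA.contains k = true := by
    rw [PySem.Dict.contains_eq_decide_mem_keys, hk]; simpa using hkmem
  cases hB : dB.getD k [] with
  | nil => exact absurd ((hv k).1 hB) (by simp [hc])
  | cons i0 rest =>
    obtain ⟨_, hA⟩ := (hv k).2 i0 rest hB
    simp only [Function.comp, hB, hA, pvInner]
    refine congrArg _ (congrArg _ (congrArg _ ?_))
    have h0 : PySem.List.pyGetD (i0 :: rest) 0 0 = i0 := by
      simp [PySem.List.pyGetD, PySem.List.pyGet?, PySem.List.pyIdx?]
    rw [h0, pvGetNeg]
    simp

-- ===== VERDICT (by name: the statement is the Claim_ definition above) =====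
theorem getfullblocks_spec : Claim_equal_getfullblocks := by
  intro basis _
  unfold Spec_getfullblocks getfullblocks getfullblocks_alt
  refine pvItems _ _ (pvFold _ _ _ ?_)
  refine ⟨rfl, by exact List.nodup_nil, ?_⟩
  intro k
  constructor
  · intro _; rfl
  · intro i0 rest hrest
    rw [PySem.Dict.getD_empty] at hrest
    cases hrest
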